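-- pv_equiv track=rewrite | github.com/franss22/costilla-bot | gachaControl.py | check_to_DMG_able
-- ===== SOURCE A (Python) =====
-- def check_to_DMG_able(check_num) -> str:
--     tablas = {
--         41: "I",
--         36: "H",
--         31: "G",
--         26: "F",
--         21: "E",
--         16: "D",
--         11: "C",
--         6: "B",
--         1: "A"
--     }
--     if check_num <= 0:
--         return None
--     for min_check in tablas.keys():
--         if check_num >= min_check:
--             return tablas[min_check]
-- ===== SOURCE B (Python) =====
-- def check_to_DMG_able(check_num) -> str:
--     if check_num <= 0:
--         return None
--     return chr(ord('A') + int(min((check_num - 1) // 5, 8)))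
-- ===== Notes on version B (the rewrite author's own statement) =====
-- stated objective: simpler
-- what changed: Replaced the nine-entry threshold dict and linear key scan with a closed-form arithmetic index chr(ord('A') + min((n-1)//5, 8)).
import Mathlib
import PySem

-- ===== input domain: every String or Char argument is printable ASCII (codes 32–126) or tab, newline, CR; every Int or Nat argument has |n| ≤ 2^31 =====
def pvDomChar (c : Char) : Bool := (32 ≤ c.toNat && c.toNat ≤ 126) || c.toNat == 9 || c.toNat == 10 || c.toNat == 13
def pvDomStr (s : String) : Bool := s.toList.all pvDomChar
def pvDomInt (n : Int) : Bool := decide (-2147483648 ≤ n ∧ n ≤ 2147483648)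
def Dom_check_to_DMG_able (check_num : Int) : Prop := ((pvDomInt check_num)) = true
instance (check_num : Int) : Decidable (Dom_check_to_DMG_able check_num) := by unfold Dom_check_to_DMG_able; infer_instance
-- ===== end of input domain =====

-- B replaces A's threshold-dict linear scan with a closed-form arithmetic grade index (simpler).


-- ===== PORT A =====
-- the 'for min_check in tablas.keys(): if check_num >= min_check: return tablas[min_check]' loop
def checkLoopA (check_num : Int) (d : PySem.Dict Int String) : List Int → Option String
  | [] => none                                   -- loop falls through: implicit None
  | k :: ks => if check_num ≥ k then d.get? k else checkLoopA check_num d ks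

def check_to_DMG_able (check_num : Int) : Option String :=
  let tablas : PySem.Dict Int String :=
    (((((((((PySem.Dict.empty).insert 41 "I").insert 36 "H").insert 31 "G").insert 26 "F").insert
      21 "E").insert 16 "D").insert 11 "C").insert 6 "B").insert 1 "A"
  if check_num ≤ 0 then none
  else checkLoopA check_num tablas tablas.keys

-- ===== PORT B =====
def check_to_DMG_able_alt (check_num : Int) : Option String :=
  if check_num ≤ 0 then none
  else some (String.ofList [Char.ofNat ('A'.toNat + (min (PySem.Int.floordiv (check_num - 1) 5) 8).toNat)])

-- ===== PRECONDITION & SPEC =====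
def Spec_check_to_DMG_able (check_num : Int) (out : Option String) : Prop := out = check_to_DMG_able_alt check_num
instance (check_num : Int) (out : Option String) : Decidable (Spec_check_to_DMG_able check_num out) := by unfold Spec_check_to_DMG_able; infer_instance

-- ===== CLAIM (what is proved, stated in full; the proofs are below) =====
def Claim_equal_check_to_DMG_able : Prop := ∀ (check_num : Int), Dom_check_to_DMG_able check_num → Spec_check_to_DMG_able check_num (check_to_DMG_able check_num)

-- ===== LEMMAS AND PROOFS =====
theorem alt_of_idx (n : Int) (hn : ¬ n ≤ 0) (c : Int) (hc : min (PySem.Int.floordiv (n - 1) 5) 8 = c) :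
    check_to_DMG_able_alt n = some (String.ofList [Char.ofNat ('A'.toNat + c.toNat)]) := by
  unfold check_to_DMG_able_alt
  rw [if_neg hn, hc]

set_option maxHeartbeats 2000000 in
theorem portA_eval (n : Int) (h0 : ¬ n ≤ 0) :
    check_to_DMG_able n =
      (if 41 ≤ n then some "I" else if 36 ≤ n then some "H" else if 31 ≤ n then some "G"
       else if 26 ≤ n then some "F" else if 21 ≤ n then some "E" else if 16 ≤ n then some "D"
       else if 11 ≤ n then some "C" else if 6 ≤ n then some "B" else if 1 ≤ n then some "A"
       else none) := by
  simp [check_to_DMG_able, checkLoopA, PySem.Dict.keys, PySem.Dict.insert, PySem.Dict.get?,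
    PySem.Dict.empty, h0]

-- ===== VERDICT (by name: the statement is the Claim_ definition above) =====
set_option maxHeartbeats 4000000 in
theorem check_to_DMG_able_spec : Claim_equal_check_to_DMG_able := by
  intro n _
  unfold Spec_check_to_DMG_able
  by_cases h0 : n ≤ 0
  · simp [check_to_DMG_able, check_to_DMG_able_alt, h0]
  · have hfd : PySem.Int.floordiv (n - 1) 5 = (n - 1) / 5 :=
      PySem.Int.floordiv_eq_ediv_of_pos (by omega)
    rcases (by omega :
        (41 ≤ n) ∨ (36 ≤ n ∧ n < 41) ∨ (31 ≤ n ∧ n < 36) ∨ (26 ≤ n ∧ n < 31) ∨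
        (21 ≤ n ∧ n < 26) ∨ (16 ≤ n ∧ n < 21) ∨ (11 ≤ n ∧ n < 16) ∨ (6 ≤ n ∧ n < 11) ∨
        (1 ≤ n ∧ n < 6)) with h | h | h | h | h | h | h | h | h
    · rw [alt_of_idx n h0 8 (by rw [hfd]; omega),
        (by decide : String.ofList [Char.ofNat ('A'.toNat + (8 : Int).toNat)] = "I"),
        portA_eval n h0]
      rw [if_pos h]
    · rw [alt_of_idx n h0 7 (by rw [hfd]; omega),
        (by decide : String.ofList [Char.ofNat ('A'.toNat + (7 : Int).toNat)] = "H"),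
        portA_eval n h0]
      split_ifs <;> first | rfl | omega
    · rw [alt_of_idx n h0 6 (by rw [hfd]; omega),
        (by decide : String.ofList [Char.ofNat ('A'.toNat + (6 : Int).toNat)] = "G"),
        portA_eval n h0]
      split_ifs <;> first | rfl | omega
    · rw [alt_of_idx n h0 5 (by rw [hfd]; omega),
        (by decide : String.ofList [Char.ofNat ('A'.toNat + (5 : Int).toNat)] = "F"),
        portA_eval n h0]
      split_ifs <;> first | rfl | omega
    · rw [alt_of_idx n h0 4 (by rw [hfd]; omega),
        (by decide : String.ofList [Char.ofNat ('A'.toNat + (4 : Int).toNat)] = "E"),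
        portA_eval n h0]
      split_ifs <;> first | rfl | omega
    · rw [alt_of_idx n h0 3 (by rw [hfd]; omega),
        (by decide : String.ofList [Char.ofNat ('A'.toNat + (3 : Int).toNat)] = "D"),
        portA_eval n h0]
      split_ifs <;> first | rfl | omega
    · rw [alt_of_idx n h0 2 (by rw [hfd]; omega),
        (by decide : String.ofList [Char.ofNat ('A'.toNat + (2 : Int).toNat)] = "C"),
        portA_eval n h0]
      split_ifs <;> first | rfl | omega
    · rw [alt_of_idx n h0 1 (by rw [hfd]; omega),
        (by decide : String.ofList [Char.ofNat ('A'.toNat + (1 : Int).toNat)] = "B"),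
        portA_eval n h0]
      split_ifs <;> first | rfl | omega
    · rw [alt_of_idx n h0 0 (by rw [hfd]; omega),
        (by decide : String.ofList [Char.ofNat ('A'.toNat + (0 : Int).toNat)] = "A"),
        portA_eval n h0]
      split_ifs <;> first | rfl | omega
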